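-- pv_equiv track=rewrite | github.com/xdudaj02/Bioinformatics | lab_3/sequence_pattern_finding.py | finds_patterns_frequency
-- ===== SOURCE A (Python) =====
-- def	finds_patterns_frequency(seqA, seqB, low, high):
--     if low < 1 or high < 1 or low > high:
--         return None
--
--     res = {}
--     for i in range(len(seqA) - low + 1):
--         for j in range(low, high + 1):
--             pat = seqA[i:i+j]
--             if pat in seqB:
--                 res[pat] = res.get(pat, 0) + 1
--
--     return dict(sorted(res.items(), key=lambda x: x[1], reverse=True))
-- ===== SOURCE B (Python) =====
-- def finds_patterns_frequency(seqA, seqB, low, high):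
--     if low < 1 or high < 1 or low > high:
--         return None
--     res = {}
--     for i in range(len(seqA) - low + 1):
--         # Membership of seqA[i:i+j] in seqB is monotone decreasing in j (a prefix of a
--         # substring of seqB is itself a substring of seqB), so binary-search the largest
--         # j in [low-1, high] whose window occurs in seqB, then count all shorter windows
--         # unconditionally.
--         lo, hi = low - 1, high
--         while lo < hi:
--             mid = (lo + hi + 1) // 2
--             if seqA[i:i+mid] in seqB:
--                 lo = mid
--             else:
--                 hi = mid - 1
--         for j in range(low, lo + 1):
--             pat = seqA[i:i+j]
--             res[pat] = res.get(pat, 0) + 1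
--     return dict(sorted(res.items(), key=lambda x: x[1], reverse=True))
-- ===== Notes on version B (the rewrite author's own statement) =====
-- stated objective: alternative
-- what changed: For each start index i, B binary-searches the longest window length L in [low-1, high] whose window seqA[i:i+L] occurs in seqB (membership is monotone in window length since a prefix of a substring is a substring) and then counts the windows of lengths low..L unconditionally, instead of A's per-length linear membership test over all of low..high.
import Mathlib
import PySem

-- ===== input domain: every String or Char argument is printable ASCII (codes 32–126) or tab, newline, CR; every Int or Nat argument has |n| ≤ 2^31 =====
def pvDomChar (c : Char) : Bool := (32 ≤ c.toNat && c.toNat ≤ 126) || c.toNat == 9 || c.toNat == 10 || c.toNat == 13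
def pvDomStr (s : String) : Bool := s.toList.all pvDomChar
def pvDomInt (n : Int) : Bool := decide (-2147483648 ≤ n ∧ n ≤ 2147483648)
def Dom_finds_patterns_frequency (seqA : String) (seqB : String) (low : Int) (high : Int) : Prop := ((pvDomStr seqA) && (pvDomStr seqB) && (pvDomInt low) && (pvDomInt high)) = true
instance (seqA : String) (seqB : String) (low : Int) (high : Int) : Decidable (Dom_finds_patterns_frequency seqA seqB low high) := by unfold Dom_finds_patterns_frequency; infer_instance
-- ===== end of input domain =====

-- ===== PORT A =====
-- B replaces A's per-length membership scan by a binary search for the longest window of seqA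
-- starting at i that occurs in seqB (membership is monotone in the length), then counts the
-- shorter windows unconditionally; objective: alternative algorithm (same worst-case cost).
def finds_patterns_frequency (seqA : String) (seqB : String) (low : Int) (high : Int) : Option (List (String × Int)) :=
  if low < 1 ∨ high < 1 ∨ low > high then none
  else
    let res : PySem.Dict String Int :=
      (PySem.List.pyRange 0 (PySem.Str.len seqA - low + 1)).foldl (fun res i =>
        (PySem.List.pyRange low (high + 1)).foldl (fun res j =>
          let pat := PySem.Str.slice seqA (some i) (some (i + j))
          if PySem.Str.isIn pat seqB then res.modify pat 0 (· + 1) else res) res)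
        PySem.Dict.empty
    some (PySem.List.sorted res.items (fun x => x.2) true)

-- ===== PORT B =====
-- binary search: largest j in [lo, hi] such that seqA[i:i+j] occurs in seqB (monotone predicate)
def pvBsearch (seqA : String) (seqB : String) (i : Int) (lo : Int) (hi : Int) : Int :=
  if h : lo < hi then
    let mid := PySem.Int.floordiv (lo + hi + 1) 2
    if PySem.Str.isIn (PySem.Str.slice seqA (some i) (some (i + mid))) seqB then
      pvBsearch seqA seqB i mid hi
    else
      pvBsearch seqA seqB i lo (mid - 1)
  else lo
termination_by (hi - lo).toNat
decreasing_by
  all_goals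
    simp only [PySem.Int.floordiv_eq_ediv_of_pos (by norm_num : (0:Int) < 2)]
    omega

def finds_patterns_frequency_alt (seqA : String) (seqB : String) (low : Int) (high : Int) : Option (List (String × Int)) :=
  if low < 1 ∨ high < 1 ∨ low > high then none
  else
    let res : PySem.Dict String Int :=
      (PySem.List.pyRange 0 (PySem.Str.len seqA - low + 1)).foldl (fun res i =>
        let L := pvBsearch seqA seqB i (low - 1) high
        (PySem.List.pyRange low (L + 1)).foldl (fun res j =>
          res.modify (PySem.Str.slice seqA (some i) (some (i + j))) 0 (· + 1)) res)
        PySem.Dict.empty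
    some (PySem.List.sorted res.items (fun x => x.2) true)

-- ===== PRECONDITION & SPEC =====
def Spec_finds_patterns_frequency (seqA : String) (seqB : String) (low : Int) (high : Int) (out : Option (List (String × Int))) : Prop := out = finds_patterns_frequency_alt seqA seqB low high
instance (seqA : String) (seqB : String) (low : Int) (high : Int) (out : Option (List (String × Int))) : Decidable (Spec_finds_patterns_frequency seqA seqB low high out) := by unfold Spec_finds_patterns_frequency; infer_instance

-- ===== CLAIM (what is proved, stated in full; the proofs are below) =====
def Claim_equal_finds_patterns_frequency : Prop := ∀ (seqA : String) (seqB : String) (low : Int) (high : Int), Dom_finds_patterns_frequency seqA seqB low high → Spec_finds_patterns_frequency seqA seqB low high (finds_patterns_frequency seqA seqB low high)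

-- ===== LEMMAS AND PROOFS =====

-- membership of the window seqA[i:i+j] in seqB is monotone decreasing in j
theorem pvMono (seqA seqB : String) (i j k : Int) (hi0 : 0 ≤ i) (hj0 : 0 ≤ j) (hjk : j ≤ k)
    (h : PySem.Str.isIn (PySem.Str.slice seqA (some i) (some (i + k))) seqB = true) :
    PySem.Str.isIn (PySem.Str.slice seqA (some i) (some (i + j))) seqB = true := by
  rw [PySem.Str.isIn_iff_infix] at h ⊢
  rw [PySem.Str.toList_slice, PySem.Chars.slice_eq_listSlice,
      PySem.List.slice_toNat _ hi0 (by omega)] at h ⊢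
  have hj : (i + j).toNat - i.toNat = j.toNat := by omega
  have hk : (i + k).toNat - i.toNat = k.toNat := by omega
  rw [hj]
  rw [hk] at h
  have hpre : List.take j.toNat (List.drop i.toNat seqA.toList)
      = List.take j.toNat (List.take k.toNat (List.drop i.toNat seqA.toList)) := by
    rw [List.take_take, min_eq_left (by omega)]
  rw [hpre]
  exact ((List.take_prefix _ _).isInfix).trans h

theorem pvBsearch_eq (seqA seqB : String) (i lo hi : Int) (h : lo < hi) :
    pvBsearch seqA seqB i lo hi =
      if PySem.Str.isIn (PySem.Str.slice seqA (some i) (some (i + PySem.Int.floordiv (lo + hi + 1) 2))) seqB then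
        pvBsearch seqA seqB i (PySem.Int.floordiv (lo + hi + 1) 2) hi
      else
        pvBsearch seqA seqB i lo (PySem.Int.floordiv (lo + hi + 1) 2 - 1) := by
  rw [pvBsearch]
  simp only [dif_pos h]

theorem pvBsearch_spec (seqA seqB : String) (i : Int) (n : Nat) :
    ∀ (lo hi : Int), (hi - lo).toNat ≤ n → 0 ≤ lo → lo ≤ hi →
    lo ≤ pvBsearch seqA seqB i lo hi ∧ pvBsearch seqA seqB i lo hi ≤ hi ∧
      (lo < pvBsearch seqA seqB i lo hi →
        PySem.Str.isIn (PySem.Str.slice seqA (some i) (some (i + pvBsearch seqA seqB i lo hi))) seqB = true) ∧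
      (pvBsearch seqA seqB i lo hi < hi →
        PySem.Str.isIn (PySem.Str.slice seqA (some i) (some (i + (pvBsearch seqA seqB i lo hi + 1)))) seqB = false) := by
  induction n with
  | zero =>
    intro lo hi hn h0 hle
    have heq : hi = lo := by omega
    subst heq
    rw [pvBsearch]
    simp only [lt_irrefl, dite_false]
    exact ⟨le_refl _, le_refl _, fun h => h.elim, fun h => h.elim⟩
  | succ n ih =>
    intro lo hi hn h0 hle
    by_cases hlh : lo < hi
    · rw [pvBsearch_eq _ _ _ _ _ hlh]
      have hm : PySem.Int.floordiv (lo + hi + 1) 2 = (lo + hi + 1) / 2 :=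
        PySem.Int.floordiv_eq_ediv_of_pos (by norm_num)
      set m := PySem.Int.floordiv (lo + hi + 1) 2 with hmdef
      have h1 : lo < m := by omega
      have h2 : m ≤ hi := by omega
      by_cases hin : PySem.Str.isIn (PySem.Str.slice seqA (some i) (some (i + m))) seqB = true
      · rw [if_pos hin]
        obtain ⟨a, b, c, d⟩ := ih m hi (by omega) (by omega) h2
        refine ⟨by omega, b, fun _ => ?_, d⟩
        rcases lt_or_eq_of_le a with h' | h'
        · exact c h'
        · rw [← h']; exact hin
      · rw [if_neg hin]
        obtain ⟨a, b, c, d⟩ := ih lo (m - 1) (by omega) h0 (by omega)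
        refine ⟨a, by omega, c, fun hL => ?_⟩
        rcases lt_or_eq_of_le (b : pvBsearch seqA seqB i lo (m - 1) ≤ m - 1) with h' | h'
        · exact d (by omega)
        · rw [h']
          simp only [sub_add_cancel]
          exact Bool.not_eq_true _ ▸ eq_false_of_ne_true hin
    · rw [pvBsearch]
      simp only [dif_neg hlh]
      exact ⟨le_refl _, hle, fun h => absurd h (lt_irrefl _), fun h => absurd h hlh⟩

-- the inner loop of A equals the binary-search-then-count loop of B, for each window start i
theorem pvInner (seqA seqB : String) (low high i : Int) (h1 : 1 ≤ low) (hlh : low ≤ high)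
    (hi0 : 0 ≤ i) (res : PySem.Dict String Int) :
    (PySem.List.pyRange low (high + 1)).foldl (fun res j =>
        let pat := PySem.Str.slice seqA (some i) (some (i + j))
        if PySem.Str.isIn pat seqB then res.modify pat 0 (· + 1) else res) res
    = (PySem.List.pyRange low (pvBsearch seqA seqB i (low - 1) high + 1)).foldl (fun res j =>
        res.modify (PySem.Str.slice seqA (some i) (some (i + j))) 0 (· + 1)) res := by
  obtain ⟨a, b, c, d⟩ := pvBsearch_spec seqA seqB i (high - (low - 1)).toNat (low - 1) high (le_refl _) (by omega) (by omega)
  set L := pvBsearch seqA seqB i (low - 1) high with hL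
  have Ptrue : ∀ j : Int, low ≤ j → j ≤ L →
      PySem.Str.isIn (PySem.Str.slice seqA (some i) (some (i + j))) seqB = true := by
    intro j hj hjL
    exact pvMono seqA seqB i j L hi0 (by omega) hjL (c (by omega))
  have Pfalse : ∀ j : Int, L < j → j ≤ high →
      PySem.Str.isIn (PySem.Str.slice seqA (some i) (some (i + j))) seqB = false := by
    intro j hj hjh
    have hd := d (by omega)
    cases hP : PySem.Str.isIn (PySem.Str.slice seqA (some i) (some (i + j))) seqB with
    | false => rfl
    | true =>
      have := pvMono seqA seqB i (L + 1) j hi0 (by omega) (by omega) hP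
      rw [this] at hd
      exact absurd hd (by simp)
  rw [PySem.List.pyRange_one_append low (L + 1) (high + 1) (by omega) (by omega), List.foldl_append]
  have hfst : ∀ (acc : PySem.Dict String Int), ∀ j ∈ PySem.List.pyRange low (L + 1),
      (let pat := PySem.Str.slice seqA (some i) (some (i + j))
       if PySem.Str.isIn pat seqB then acc.modify pat 0 (· + 1) else acc)
      = acc.modify (PySem.Str.slice seqA (some i) (some (i + j))) 0 (· + 1) := by
    intro acc j hj
    rw [PySem.List.mem_pyRange_one] at hj
    exact if_pos (Ptrue j hj.1 (by omega))
  rw [PySem.List.foldl_congr_mem _ _ _ res hfst]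
  have hsnd : ∀ (acc : PySem.Dict String Int), ∀ j ∈ PySem.List.pyRange (L + 1) (high + 1),
      (let pat := PySem.Str.slice seqA (some i) (some (i + j))
       if PySem.Str.isIn pat seqB then acc.modify pat 0 (· + 1) else acc) = acc := by
    intro acc j hj
    rw [PySem.List.mem_pyRange_one] at hj
    exact if_neg (by rw [Pfalse j (by omega) (by omega)]; decide)
  rw [PySem.List.foldl_congr_mem _ _ (fun acc _ => acc) _ hsnd, List.foldl_fixed]

-- ===== VERDICT (by name: the statement is the Claim_ definition above) =====
theorem finds_patterns_frequency_spec : Claim_equal_finds_patterns_frequency := by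
  intro seqA seqB low high _
  unfold Spec_finds_patterns_frequency finds_patterns_frequency finds_patterns_frequency_alt
  split_ifs with hguard
  · rfl
  · have hlh : low ≤ high := by omega
    have : ∀ (acc : PySem.Dict String Int), ∀ i ∈ PySem.List.pyRange 0 (PySem.Str.len seqA - low + 1),
        (PySem.List.pyRange low (high + 1)).foldl (fun res j =>
            let pat := PySem.Str.slice seqA (some i) (some (i + j))
            if PySem.Str.isIn pat seqB then res.modify pat 0 (· + 1) else res) acc
        = (PySem.List.pyRange low (pvBsearch seqA seqB i (low - 1) high + 1)).foldl (fun res j =>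
            res.modify (PySem.Str.slice seqA (some i) (some (i + j))) 0 (· + 1)) acc := by
      intro acc i hi
      rw [PySem.List.mem_pyRange_one] at hi
      exact pvInner seqA seqB low high i (by omega) (by omega) hi.1 acc
    rw [PySem.List.foldl_congr_mem _ _ _ PySem.Dict.empty this]
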